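-- pv_equiv track=rewrite | github.com/MustafaKarakasTr/CSE-321-Introduction-to-Algorithms-Course-Homeworks | HW3/CSE321_HW3_1801042627/count_str_1801042627.py | count_str
-- ===== SOURCE A (Python) =====
-- start       = 'X'
--
-- end         = 'Z'
--
-- def count_str(str,start, end):
--     numberOfStartCharacters = 0
--     sum = 0
--     for c in str:
--         if(c == start):
--             numberOfStartCharacters+=1
--         elif(c == end):
--             sum += numberOfStartCharacters
--     return sum
-- ===== SOURCE B (Python) =====
-- def count_str(str, start, end):
--     # pass 1: prefix[i] = number of `start` chars strictly before position i
--     prefix = []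
--     n = 0
--     for c in str:
--         prefix.append(n)
--         if c == start:
--             n += 1
--     # pass 2: sum prefix counts at `end` positions (elif semantics: skip chars equal to start)
--     total = 0
--     for p, c in zip(prefix, str):
--         if c == end and c != start:
--             total += p
--     return total
-- ===== Notes on version B (the rewrite author's own statement) =====
-- stated objective: alternative
-- what changed: Replaces A's single interleaved counting pass by two passes: first build a prefix table of start-character counts strictly before each position, then sum the table entries at end positions (excluding chars equal to start).
import Mathlib
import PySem

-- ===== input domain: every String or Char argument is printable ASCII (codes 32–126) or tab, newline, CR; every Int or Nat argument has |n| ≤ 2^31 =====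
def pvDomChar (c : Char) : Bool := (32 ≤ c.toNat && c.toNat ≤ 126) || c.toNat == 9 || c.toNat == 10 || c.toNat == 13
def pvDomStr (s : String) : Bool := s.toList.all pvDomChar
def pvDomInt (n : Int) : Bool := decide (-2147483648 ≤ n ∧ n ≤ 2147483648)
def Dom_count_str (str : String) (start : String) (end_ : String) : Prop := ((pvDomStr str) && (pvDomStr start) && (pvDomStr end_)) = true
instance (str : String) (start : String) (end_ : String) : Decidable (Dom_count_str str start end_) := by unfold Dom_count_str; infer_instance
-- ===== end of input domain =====

-- B replaces A's single interleaved pass by a prefix-count table pass plus a separate summation pass (alternative decomposition, same cost).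

-- ===== PORT A =====
-- literal port of A: one fold carrying (numberOfStartCharacters, sum)
def count_str (str : String) (start : String) (end_ : String) : Int :=
  (str.toList.foldl (fun (acc : Int × Int) c =>
      if String.ofList [c] = start then (acc.1 + 1, acc.2)
      else if String.ofList [c] = end_ then (acc.1, acc.2 + acc.1)
      else acc) (0, 0)).2

-- ===== PORT B =====
-- literal port of Source B: pass 1 builds the prefix table (appending), pass 2 sums over zip
def count_str_alt (str : String) (start : String) (end_ : String) : Int :=
  let pn := str.toList.foldl (fun (acc : List Int × Int) c =>
      (acc.1 ++ [acc.2], if String.ofList [c] = start then acc.2 + 1 else acc.2)) ([], 0)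
  (pn.1.zip str.toList).foldl (fun t pc =>
      if String.ofList [pc.2] = end_ ∧ String.ofList [pc.2] ≠ start then t + pc.1 else t) 0

-- ===== PRECONDITION & SPEC =====
def Spec_count_str (str : String) (start : String) (end_ : String) (out : Int) : Prop := out = count_str_alt str start end_
instance (str : String) (start : String) (end_ : String) (out : Int) : Decidable (Spec_count_str str start end_ out) := by unfold Spec_count_str; infer_instance

-- ===== CLAIM (what is proved, stated in full; the proofs are below) =====
def Claim_equal_count_str : Prop := ∀ (str : String) (start : String) (end_ : String), Dom_count_str str start end_ → Spec_count_str str start end_ (count_str str start end_)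

-- ===== LEMMAS AND PROOFS =====

-- pass 1 with an accumulated prefix list p is p ++ the fold started from []
theorem pv_build_append (start : String) (cs : List Char) (p : List Int) (n : Int) :
    cs.foldl (fun (acc : List Int × Int) c =>
        (acc.1 ++ [acc.2], if String.ofList [c] = start then acc.2 + 1 else acc.2)) (p, n)
      = (p ++ (cs.foldl (fun (acc : List Int × Int) c =>
          (acc.1 ++ [acc.2], if String.ofList [c] = start then acc.2 + 1 else acc.2)) ([], n)).1,
         (cs.foldl (fun (acc : List Int × Int) c =>
          (acc.1 ++ [acc.2], if String.ofList [c] = start then acc.2 + 1 else acc.2)) ([], n)).2) := by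
  induction cs generalizing p n with
  | nil => simp
  | cons c cs ih =>
    simp only [List.foldl_cons]
    rw [ih (p ++ [n]), ih ([] ++ [n])]
    simp

-- pass 2 with initial accumulator t is t + the fold from 0
theorem pv_sum_shift (start end_ : String) (l : List (Int × Char)) (t : Int) :
    l.foldl (fun t pc =>
        if String.ofList [pc.2] = end_ ∧ String.ofList [pc.2] ≠ start then t + pc.1 else t) t
      = t + l.foldl (fun t pc =>
        if String.ofList [pc.2] = end_ ∧ String.ofList [pc.2] ≠ start then t + pc.1 else t) 0 := by
  induction l generalizing t with
  | nil => simp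
  | cons pc l ih =>
    by_cases h : String.ofList [pc.2] = end_ ∧ String.ofList [pc.2] ≠ start
    · simp only [List.foldl_cons, if_pos h]
      rw [ih (t + pc.1), ih (0 + pc.1)]
      ring
    · simp only [List.foldl_cons, if_neg h]
      exact ih t

-- main invariant: A's loop from (n, s) equals s plus B's two-pass sum with prefix counts starting at n
theorem pv_main (start end_ : String) (cs : List Char) (n s : Int) :
    (cs.foldl (fun (acc : Int × Int) c =>
        if String.ofList [c] = start then (acc.1 + 1, acc.2)
        else if String.ofList [c] = end_ then (acc.1, acc.2 + acc.1)
        else acc) (n, s)).2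
      = s + (((cs.foldl (fun (acc : List Int × Int) c =>
            (acc.1 ++ [acc.2], if String.ofList [c] = start then acc.2 + 1 else acc.2)) ([], n)).1).zip cs).foldl
            (fun t pc => if String.ofList [pc.2] = end_ ∧ String.ofList [pc.2] ≠ start then t + pc.1 else t) 0 := by
  induction cs generalizing n s with
  | nil => simp
  | cons c cs ih =>
    simp only [List.foldl_cons, List.nil_append]
    rw [pv_build_append start cs [n]]
    simp only [List.cons_append, List.nil_append, List.zip_cons_cons, List.foldl_cons]
    rw [pv_sum_shift]
    by_cases hs : String.ofList [c] = start
    · simp only [if_pos hs]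
      rw [ih, if_neg (fun h => h.2 hs)]
      ring
    · by_cases he : String.ofList [c] = end_
      · simp only [if_neg hs, if_pos he]
        rw [ih, if_pos ⟨he, hs⟩]
        ring
      · simp only [if_neg hs, if_neg he]
        rw [ih, if_neg (fun h => he h.1)]
        ring

-- ===== VERDICT (by name: the statement is the Claim_ definition above) =====
theorem count_str_spec : Claim_equal_count_str := by
  intro str start end_ _
  unfold Spec_count_str count_str count_str_alt
  simpa using pv_main start end_ str.toList 0 0
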